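-- pv_equiv track=rewrite | github.com/BoeJaker/Vera-AI | Toolchain/enhanced_toolchain_planner.py | _validate_and_enhance_plan
-- ===== SOURCE A (Python) =====
-- from typing import List, Dict, Any, Optional, Generator, Tuple, Set
--
-- def _validate_and_enhance_plan(plan: List[Dict]) -> List[Dict]:
--     """Validate and enhance plan for completeness"""
--     if isinstance(plan, dict):
--         plan = [plan]
--
--     enhanced_plan = []
--
--     for i, step in enumerate(plan):
--         enhanced_plan.append(step)
--
--         # Auto-add web_search_deep after web_search
--         if step.get("tool") == "web_search":
--             if i + 1 < len(plan):
--                 next_step = plan[i + 1]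
--                 if next_step.get("tool") != "web_search_deep":
--                     enhanced_plan.append({
--                         "tool": "web_search_deep",
--                         "input": "{prev}",
--                         "_auto_added": True,
--                         "_reason": "Fetch actual content from search results"
--                     })
--             else:
--                 enhanced_plan.append({
--                     "tool": "web_search_deep",
--                     "input": "{prev}",
--                     "_auto_added": True,
--                     "_reason": "Fetch actual content from search results"
--                 })
--
--     return enhanced_plan
-- ===== SOURCE B (Python) =====
-- def _validate_and_enhance_plan(plan):
--     """Validate and enhance plan for completeness (backwards pass, building the output back-to-front)"""
--     if isinstance(plan, dict):
--         plan = [plan]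
--
--     enhanced_plan = []
--     next_tool = None  # tool of the step that follows the current one in the original order
--     for step in reversed(plan):
--         if step.get("tool") == "web_search" and next_tool != "web_search_deep":
--             enhanced_plan = [{
--                 "tool": "web_search_deep",
--                 "input": "{prev}",
--                 "_auto_added": True,
--                 "_reason": "Fetch actual content from search results"
--             }] + enhanced_plan
--         enhanced_plan = [step] + enhanced_plan
--         next_tool = step.get("tool")
--     return enhanced_plan
-- ===== Notes on version B (the rewrite author's own statement) =====
-- stated objective: alternative
-- what changed: The output is built back-to-front by a single reverse traversal that prepends, carrying the tool of the already-processed following step, instead of A's forward enumerate loop that appends and peeks ahead with an index into plan[i+1] plus a separate end-of-list branch.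
import Mathlib
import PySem

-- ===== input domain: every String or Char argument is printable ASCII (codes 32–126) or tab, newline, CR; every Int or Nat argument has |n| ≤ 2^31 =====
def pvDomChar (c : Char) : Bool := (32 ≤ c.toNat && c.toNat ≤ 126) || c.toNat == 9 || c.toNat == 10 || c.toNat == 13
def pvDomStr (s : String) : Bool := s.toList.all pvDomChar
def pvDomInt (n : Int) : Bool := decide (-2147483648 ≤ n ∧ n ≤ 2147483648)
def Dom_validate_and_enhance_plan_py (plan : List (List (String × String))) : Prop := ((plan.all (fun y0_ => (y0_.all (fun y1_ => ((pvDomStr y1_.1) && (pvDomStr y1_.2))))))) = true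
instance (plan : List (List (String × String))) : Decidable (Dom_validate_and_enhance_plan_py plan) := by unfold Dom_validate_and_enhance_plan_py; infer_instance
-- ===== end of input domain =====

-- B builds the output back-to-front by one reverse traversal carrying the following step's tool,
-- instead of A's forward enumerate loop that appends and peeks ahead with plan[i+1];
-- same return value (return value only — neither program mutates its input).
-- The Python auto-added step carries the boolean True; under the String value type fixed for this
-- task it is rendered "True" identically in both ports.

-- ===== PORT A =====
-- the auto-added step literal; Python's True rendered as "True" under the String value type
def pvAuto : List (String × String) :=
  [("tool", "web_search_deep"), ("input", "{prev}"), ("_auto_added", "True"),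
   ("_reason", "Fetch actual content from search results")]

-- step.get("tool"): first binding of the key in the association list (Python dict keys are unique)
def pvGetTool (step : List (String × String)) : Option String :=
  (step.find? (fun p => p.1 == "tool")).map (·.2)

-- the body of A's 'for i, step in enumerate(plan)' loop (the 'none' arm of pyGet? is unreachable: i+1 < len(plan))
def pvAStep (plan : List (List (String × String))) (enhanced_plan : List (List (String × String)))
    (ix : Int × List (String × String)) : List (List (String × String)) :=
  let enhanced_plan := enhanced_plan ++ [ix.2]
  if pvGetTool ix.2 = some "web_search" then
    if ix.1 + 1 < (plan.length : Int) then
      match PySem.List.pyGet? plan (ix.1 + 1) with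
      | some next_step =>
          if pvGetTool next_step ≠ some "web_search_deep" then enhanced_plan ++ [pvAuto]
          else enhanced_plan
      | none => enhanced_plan
    else enhanced_plan ++ [pvAuto]
  else enhanced_plan

def validate_and_enhance_plan_py (plan : List (List (String × String))) :
    List (List (String × String)) :=
  (PySem.List.enumerate plan).foldl (pvAStep plan) []

-- ===== PORT B =====
-- B's loop body over reversed(plan): state = (enhanced_plan, next_tool)
def pvBStep (st : List (List (String × String)) × Option String) (step : List (String × String)) :
    List (List (String × String)) × Option String :=
  let out := if pvGetTool step == some "web_search" && !(st.2 == some "web_search_deep")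
             then pvAuto :: st.1 else st.1
  (step :: out, pvGetTool step)

def validate_and_enhance_plan_py_alt (plan : List (List (String × String))) :
    List (List (String × String)) :=
  (plan.reverse.foldl pvBStep ([], none)).1

-- ===== PRECONDITION & SPEC =====
def Spec_validate_and_enhance_plan_py (plan : List (List (String × String))) (out : List (List (String × String))) : Prop := out = validate_and_enhance_plan_py_alt plan
instance (plan : List (List (String × String))) (out : List (List (String × String))) : Decidable (Spec_validate_and_enhance_plan_py plan out) := by unfold Spec_validate_and_enhance_plan_py; infer_instance

-- ===== CLAIM (what is proved, stated in full; the proofs are below) =====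
def Claim_equal_validate_and_enhance_plan_py : Prop := ∀ (plan : List (List (String × String))), Dom_validate_and_enhance_plan_py plan → Spec_validate_and_enhance_plan_py plan (validate_and_enhance_plan_py plan)

-- ===== LEMMAS AND PROOFS =====
-- The common specification both loops compute: after each step x, insert pvAuto iff x is a
-- web_search step and the following step (if any) is not already web_search_deep.
def pvInsAfter (rest : List (List (String × String))) : List (List (String × String)) :=
  match rest with
  | [] => [pvAuto]
  | y :: _ => if pvGetTool y = some "web_search_deep" then [] else [pvAuto]

def pvSpecGo : List (List (String × String)) → List (List (String × String))
  | [] => []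
  | x :: rest =>
      x :: ((if pvGetTool x = some "web_search" then pvInsAfter rest else []) ++ pvSpecGo rest)

def pvHeadTool (l : List (List (String × String))) : Option String :=
  match l with
  | [] => none
  | x :: _ => pvGetTool x

lemma pvALoop (plan : List (List (String × String))) :
    ∀ (suf pre acc : List (List (String × String))), plan = pre ++ suf →
      (PySem.List.enumerate suf (pre.length : Int)).foldl (pvAStep plan) acc
        = acc ++ pvSpecGo suf := by
  intro suf
  induction suf with
  | nil => intro pre acc h; simp [pvSpecGo, PySem.List.enumerate]
  | cons x rest ih =>
    intro pre acc h
    rw [PySem.List.enumerate_cons]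
    simp only [List.foldl_cons]
    have hcast : (pre.length : Int) + 1 = (((pre ++ [x]).length : Nat) : Int) := by simp
    have ihx := ih (pre ++ [x]) (pvAStep plan acc ((pre.length : Int), x)) (by simp [h])
    rw [hcast, ihx]
    have hstep : pvAStep plan acc ((pre.length : Int), x)
        = acc ++ x :: (if pvGetTool x = some "web_search" then pvInsAfter rest else []) := by
      by_cases hws : pvGetTool x = some "web_search"
      · cases rest with
        | nil =>
          have hlen : ¬ ((pre.length : Int) + 1 < ((plan.length : Nat) : Int)) := by
            subst h; simp
          simp [pvAStep, hws, hlen, pvInsAfter]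
        | cons y rest' =>
          have hlen : (pre.length : Int) + 1 < ((plan.length : Nat) : Int) := by
            subst h; simp
          have hget : PySem.List.pyGet? plan ((pre.length : Int) + 1) = some y := by
            subst h
            rw [show pre ++ x :: y :: rest' = (pre ++ [x]) ++ y :: rest' by simp]
            simpa using PySem.List.pyGet?_append_length (pre ++ [x]) rest' y
          by_cases hdeep : pvGetTool y = some "web_search_deep" <;>
            simp [pvAStep, hws, hlen, hget, hdeep, pvInsAfter]
      · simp [pvAStep, hws]
    rw [hstep]
    simp [pvSpecGo]

lemma pvBLoop : ∀ (l : List (List (String × String))),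
    l.reverse.foldl pvBStep ([], none) = (pvSpecGo l, pvHeadTool l) := by
  intro l
  induction l with
  | nil => simp [pvSpecGo, pvHeadTool]
  | cons x rest ih =>
    rw [List.reverse_cons, List.foldl_append, ih]
    simp only [List.foldl_cons, List.foldl_nil]
    have hins : (if pvGetTool x == some "web_search" && !(pvHeadTool rest == some "web_search_deep")
                 then pvAuto :: pvSpecGo rest else pvSpecGo rest)
        = (if pvGetTool x = some "web_search" then pvInsAfter rest else []) ++ pvSpecGo rest := by
      by_cases hws : pvGetTool x = some "web_search"
      · cases rest with
        | nil => simp [hws, pvInsAfter, pvHeadTool]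
        | cons y rest' =>
          by_cases hdeep : pvGetTool y = some "web_search_deep" <;>
            simp [hws, hdeep, pvInsAfter, pvHeadTool]
      · simp [hws]
    simp only [pvBStep]
    rw [hins]
    simp [pvSpecGo, pvHeadTool]

-- ===== VERDICT (by name: the statement is the Claim_ definition above) =====
theorem validate_and_enhance_plan_py_spec : Claim_equal_validate_and_enhance_plan_py := by
  intro plan _
  unfold Spec_validate_and_enhance_plan_py
  have ha : validate_and_enhance_plan_py plan = pvSpecGo plan := by
    have := pvALoop plan plan [] [] (by simp)
    simpa [validate_and_enhance_plan_py] using this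
  have hb : validate_and_enhance_plan_py_alt plan = pvSpecGo plan := by
    unfold validate_and_enhance_plan_py_alt
    rw [pvBLoop]
  rw [ha, hb]
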